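-- pv_equiv track=rewrite | github.com/d14405021-coder/2026-python | weeks/week-07/solutions/1114405021/question_10062.py | solve_lost_cows
-- ===== SOURCE A (Python) =====
-- class FenwickTree:
--     def __init__(self, size):
--         self.size = size
--         # 初始時每個編號 (1~N) 都是可用的，所以初始化為 1
--         # 但在建構樹狀數組時，我們要遵守 lowbit 規則來初始化
--         self.tree = [0] * (size + 1)
--         for i in range(1, size + 1):
--             self.add(i, 1)
--
--     def add(self, i, delta):
--         # 單點修改：將第 i 個位置的值加上 delta (用來標記編號是否被用過)
--         while i <= self.size:
--             self.tree[i] += delta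
--             i += i & (-i)
--
--     def query(self, i):
--         # 前綴和查詢：回傳 1~i 之間有幾個數字是「還可用」的
--         s = 0
--         while i > 0:
--             s += self.tree[i]
--             i -= i & (-i)
--         return s
--
-- def solve_lost_cows(n, smaller_counts):
--     """
--     計算每頭牛的正確編號
--     :param n: 牛的總數
--     :param smaller_counts: 長度為 n 的陣列，表示每頭牛前面有幾頭比牠小 (第一頭固定為 0)
--     :return: 正確順序的牛編號列表
--     """
--     # 建立樹狀數組，大小為 n，用來記錄 1~N 每個數字是否還沒被用過
--     bit = FenwickTree(n)
--
--     # 準備一個存放答案的陣列，長度為 n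
--     ans = [0] * n
--
--     # 從最後一頭牛開始「由後往前」推算
--     for i in range(n - 1, -1, -1):
--         # 牠的編號必須是目前可用數字中的第 K 小 (K = 前面比牠小的數量 + 1)
--         target_k = smaller_counts[i] + 1
--
--         # 使用二分搜尋法在 1~N 尋找第 target_k 小的可用數字
--         left, right = 1, n
--         chosen_id = 1
--
--         while left <= right:
--             mid = (left + right) // 2
--             # 查詢 1~mid 之間有幾個可用的數字
--             available_count = bit.query(mid)
--
--             if available_count >= target_k:
--                 # 數量足夠，答案可能在左半邊或就是 mid
--                 chosen_id = mid
--                 right = mid - 1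
--             else:
--                 # 數量不夠，答案一定在右半邊
--                 left = mid + 1
--
--         # 找到這頭牛的編號了，記錄到答案陣列中
--         ans[i] = chosen_id
--
--         # 將這個編號從可用清單中移除 (也就是在樹狀數組中 -1)
--         bit.add(chosen_id, -1)
--
--     return ans
-- ===== SOURCE B (Python) =====
-- def solve_lost_cows(n, smaller_counts):
--     # Simpler: keep the still-unused ids as a sorted list; the cow at position i
--     # (scanned back to front) gets the (smaller_counts[i]+1)-th smallest unused id,
--     # which is exactly avail.pop(smaller_counts[i]) on the sorted list.
--     avail = list(range(1, n + 1))
--     ans = []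
--     for i in range(n - 1, -1, -1):
--         ans.append(avail.pop(smaller_counts[i]))
--     ans.reverse()
--     return ans
-- ===== Notes on version B (the rewrite author's own statement) =====
-- stated objective: simpler
-- what changed: Replaces the Fenwick tree plus per-cow binary search with a plain sorted list of unused ids from which the k-th smallest is removed directly via list.pop(smaller_counts[i]).
-- outside the precondition, e.g. on solve_lost_cows(2, [0, -1]): A returns [2, 1], B returns [1, 2]; on solve_lost_cows(2, [0, 5]): A returns [2, 1], B raises IndexError
import Mathlib
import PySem

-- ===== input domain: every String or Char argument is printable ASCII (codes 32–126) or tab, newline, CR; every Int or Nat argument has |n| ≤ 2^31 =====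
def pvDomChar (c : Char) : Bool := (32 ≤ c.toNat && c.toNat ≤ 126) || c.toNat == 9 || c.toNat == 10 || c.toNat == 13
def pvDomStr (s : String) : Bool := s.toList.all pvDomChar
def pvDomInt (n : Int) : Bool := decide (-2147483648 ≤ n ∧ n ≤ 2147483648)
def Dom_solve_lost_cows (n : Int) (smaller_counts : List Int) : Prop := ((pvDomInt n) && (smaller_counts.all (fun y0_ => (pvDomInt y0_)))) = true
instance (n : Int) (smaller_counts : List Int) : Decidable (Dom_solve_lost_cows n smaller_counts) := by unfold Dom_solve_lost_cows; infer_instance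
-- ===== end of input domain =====

-- B replaces A's Fenwick tree + per-cow binary search by a plain sorted list of the
-- still-unused ids, popping the k-th smallest directly (objective: simpler).

-- ===== PORT A =====
-- i & (-i)
def pyLowbit (i : Int) : Int := PySem.Int.band i (-i)

-- FenwickTree.add: 'while i <= self.size: tree[i] += delta; i += i & (-i)'.
-- The fuel (size + 1 - i).toNat bounds the iteration count (i grows by at least 1
-- per step on every reachable call, where 1 <= i); it only makes the loop total.
def fenAddGo (size delta : Int) : Nat → List Int → Int → List Int
  | 0, t, _ => t
  | fuel+1, t, i =>
    if i ≤ size then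
      fenAddGo size delta fuel (PySem.List.pySetD t i (PySem.List.pyGetD t i 0 + delta)) (i + pyLowbit i)
    else t

def fenAdd (size : Int) (t : List Int) (i delta : Int) : List Int :=
  fenAddGo size delta (size + 1 - i).toNat t i

-- FenwickTree.query: 'while i > 0: s += tree[i]; i -= i & (-i)'.
-- Fuel i.toNat + 1 again only bounds the loop (i shrinks by at least 1 per step).
def fenQueryGo (t : List Int) : Nat → Int → Int
  | 0, _ => 0
  | fuel+1, i => if 0 < i then PySem.List.pyGetD t i 0 + fenQueryGo t fuel (i - pyLowbit i) else 0

def fenQuery (t : List Int) (i : Int) : Int := fenQueryGo t (i.toNat + 1) i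

-- the 'while left <= right' binary search; fuel (initially n = right+1-left) bounds it
def bsearchGo (t : List Int) (k : Int) : Nat → Int → Int → Int → Int
  | 0, _, _, chosen => chosen
  | fuel+1, left, right, chosen =>
    if left ≤ right then
      -- mid = (left + right) // 2, inlined
      if k ≤ fenQuery t (PySem.Int.floordiv (left + right) 2) then
        bsearchGo t k fuel left (PySem.Int.floordiv (left + right) 2 - 1)
          (PySem.Int.floordiv (left + right) 2)
      else bsearchGo t k fuel (PySem.Int.floordiv (left + right) 2 + 1) right chosen
    else chosen

-- one iteration of A's main loop (body of 'for i in range(n - 1, -1, -1)')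
def aStep (n : Int) (sc : List Int) (st : List Int × List Int) (i : Int) : List Int × List Int :=
  let target_k := PySem.List.pyGetD sc i 0 + 1
  let chosen := bsearchGo st.1 target_k n.toNat 1 n 1
  (fenAdd n st.1 chosen (-1), PySem.List.pySetD st.2 i chosen)

def solve_lost_cows (n : Int) (smaller_counts : List Int) : List Int :=
  let bit := (PySem.List.pyRange 1 (n + 1) 1).foldl (fun t i => fenAdd n t i 1)
               (List.replicate (n + 1).toNat 0)
  let st := (PySem.List.pyRange (n - 1) (-1) (-1)).foldl (aStep n smaller_counts)
              (bit, List.replicate n.toNat 0)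
  st.2

-- ===== PORT B =====
-- one iteration of B's loop: ans.append(avail.pop(smaller_counts[i]))
-- (pop? = none is exactly where Python raises IndexError; outside Pre_)
def bStep (sc : List Int) (st : List Int × List Int) (i : Int) : List Int × List Int :=
  match PySem.List.pop? st.1 (PySem.List.pyGetD sc i 0) with
  | some (v, rest) => (rest, st.2 ++ [v])
  | none => st

def solve_lost_cows_alt (n : Int) (smaller_counts : List Int) : List Int :=
  let st := (PySem.List.pyRange (n - 1) (-1) (-1)).foldl (bStep smaller_counts)
              (PySem.List.pyRange 1 (n + 1) 1, [])
  st.2.reverse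

-- ===== PRECONDITION & SPEC =====
-- Pre_ excludes (besides n > len(smaller_counts), where A raises IndexError) the inputs
-- whose counts are not a valid smaller-counts sequence (some count outside [0, i]): no
-- cow numbering exists there, A returns its binary-search fallback while B either hits
-- Python's negative-index pop (a different, equally unspecified value) or raises IndexError.
def Pre_solve_lost_cows (n : Int) (smaller_counts : List Int) : Prop :=
  n ≤ (smaller_counts.length : Int) ∧
  ∀ i : Nat, i < n.toNat → 0 ≤ smaller_counts.getD i 0 ∧ smaller_counts.getD i 0 ≤ (i : Int)

instance (n : Int) (smaller_counts : List Int) : Decidable (Pre_solve_lost_cows n smaller_counts) := by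
  unfold Pre_solve_lost_cows; infer_instance

def pvWitness_solve_lost_cows : Int × List Int := (3, [0, 1, 1])

def Spec_solve_lost_cows (n : Int) (smaller_counts : List Int) (out : List Int) : Prop :=
  out = solve_lost_cows_alt n smaller_counts

instance (n : Int) (smaller_counts : List Int) (out : List Int) : Decidable (Spec_solve_lost_cows n smaller_counts out) := by
  unfold Spec_solve_lost_cows; infer_instance

-- ===== CLAIM (what is proved, stated in full; the proofs are below) =====
def Claim_equal_solve_lost_cows : Prop := ∀ (n : Int) (smaller_counts : List Int), Dom_solve_lost_cows n smaller_counts → Pre_solve_lost_cows n smaller_counts → Spec_solve_lost_cows n smaller_counts (solve_lost_cows n smaller_counts)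

-- ===== LEMMAS AND PROOFS =====

-- ---- the lowest set bit, over Nat ----
def lbN (a : Nat) : Nat :=
  if a = 0 then 0 else if a % 2 = 1 then 1 else 2 * lbN (a / 2)
decreasing_by omega

lemma lbN_spec : ∀ a : Nat, 0 < a → ∃ s u, lbN a = 2 ^ s ∧ a = 2 ^ s * (2 * u + 1) := by
  intro a
  induction a using Nat.strong_induction_on with
  | _ a ih =>
    intro ha
    have hne0 : a ≠ 0 := by omega
    by_cases h2 : a % 2 = 1
    · refine ⟨0, a / 2, ?_, ?_⟩
      · rw [lbN]; simp [hne0, h2]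
      · simpa using (show a = 2 * (a / 2) + 1 by omega)
    · have hb : 0 < a / 2 := by omega
      obtain ⟨s, u, h1, h2'⟩ := ih (a / 2) (by omega) hb
      refine ⟨s + 1, u, ?_, ?_⟩
      · rw [lbN]; simp only [hne0, if_false, h2, if_false, h1]
        rw [pow_succ]; ring
      · have e : 2 ^ (s + 1) * (2 * u + 1) = 2 * (2 ^ s * (2 * u + 1)) := by ring
        omega

lemma lbN_pos {a : Nat} (ha : 0 < a) : 0 < lbN a := by
  obtain ⟨s, u, h1, _⟩ := lbN_spec a ha
  rw [h1]; positivity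

lemma lbN_le {a : Nat} (ha : 0 < a) : lbN a ≤ a := by
  obtain ⟨s, u, h1, h2⟩ := lbN_spec a ha
  have : 2 ^ s * 1 ≤ 2 ^ s * (2 * u + 1) := Nat.mul_le_mul_left _ (by omega)
  omega

lemma pow2_dvd_lbN {a : Nat} (t : Nat) (ha : 0 < a) (h : 2 ^ t ∣ a) : 2 ^ t ∣ lbN a := by
  obtain ⟨s, u, h1, h2⟩ := lbN_spec a ha
  rw [h1]
  have hco : Nat.Coprime (2 ^ t) (2 * u + 1) := by
    apply Nat.Coprime.pow_left
    have : Odd (2 * u + 1) := ⟨u, by omega⟩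
    simpa [Nat.coprime_comm] using this.coprime_two_right
  exact (Nat.Coprime.dvd_of_dvd_mul_right hco) (h2 ▸ h)

-- ---- x - (x &&& (x-1)) clears all but the lowest set bit ----
lemma and_pred_eq : ∀ a : Nat, 0 < a → a - (a &&& (a - 1)) = lbN a := by
  intro a
  induction a using Nat.strong_induction_on with
  | _ a ih =>
    intro ha
    have hne0 : a ≠ 0 := by omega
    by_cases h2 : a % 2 = 1
    · obtain ⟨b, hb⟩ : ∃ b, a = 2 * b + 1 := ⟨a / 2, by omega⟩
      subst hb
      have e : 2 * b + 1 - 1 = 2 * b := by omega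
      have key : (2 * b + 1) &&& (2 * b) = 2 * (b &&& b) := by
        simpa [Nat.bit, HAnd.hAnd, AndOp.and, Nat.land] using
          Nat.bitwise_bit (f := and) (a := true) (m := b) (b := false) (n := b)
      rw [e, key, Nat.and_self, lbN]
      rw [if_neg (show ¬ 2 * b + 1 = 0 by omega), if_pos (show (2 * b + 1) % 2 = 1 by omega)]
      omega
    · obtain ⟨b, hb⟩ : ∃ b, a = 2 * b := ⟨a / 2, by omega⟩
      subst hb
      have hbpos : 0 < b := by omega
      have e : 2 * b - 1 = 2 * (b - 1) + 1 := by omega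
      have key : (2 * b) &&& (2 * (b - 1) + 1) = 2 * (b &&& (b - 1)) := by
        simpa [Nat.bit, HAnd.hAnd, AndOp.and, Nat.land] using
          Nat.bitwise_bit (f := and) (a := false) (m := b) (b := true) (n := b - 1)
      have hle : b &&& (b - 1) ≤ b := Nat.and_le_left
      have ihh := ih b (by omega) hbpos
      have hlb : lbN (2 * b) = 2 * lbN b := by
        rw [lbN, if_neg (show ¬ 2 * b = 0 by omega), if_neg (show ¬ (2 * b) % 2 = 1 by omega),
          show (2 * b) / 2 = b by omega]
      rw [e, key, hlb]
      omega

lemma pyLowbit_natCast (a : Nat) (h : 0 < a) : pyLowbit (a : Int) = ((lbN a : Nat) : Int) := by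
  unfold pyLowbit
  have h0 : (0 : Int) ≤ (a : Int) := by exact_mod_cast Nat.zero_le a
  simp [PySem.Int.band, h0]
  rw [← and_pred_eq a h]
  omega

lemma pyLowbit_int (i : Int) (h : 1 ≤ i) : pyLowbit i = ((lbN i.toNat : Nat) : Int) := by
  have e : ((i.toNat : Nat) : Int) = i := Int.toNat_of_nonneg (by omega)
  rw [← e]; exact pyLowbit_natCast i.toNat (by omega)

lemma pyLowbit_pos (i : Int) (h : 1 ≤ i) : 1 ≤ pyLowbit i := by
  rw [pyLowbit_int i h]
  exact_mod_cast lbN_pos (a := i.toNat) (by omega)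

-- ---- multiples separation and the dyadic-interval exclusion ----
lemma mult_sep {d x y : Nat} (hd : 0 < d) (hx : d ∣ x) (hy : d ∣ y) (hxy : x < y) : x + d ≤ y := by
  obtain ⟨a, rfl⟩ := hx
  obtain ⟨b, rfl⟩ := hy
  have : a < b := Nat.lt_of_mul_lt_mul_left hxy
  calc d * a + d = d * (a + 1) := by ring
    _ ≤ d * b := Nat.mul_le_mul_left _ (by omega)

lemma no_even_mult {L u p x : Nat} (hL : 0 < L) (hp : p = L * (2 * u + 1)) (hx : 2 * L ∣ x)
    (h1 : p ≤ x) (h2 : x < p + L) : False := by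
  subst hp
  obtain ⟨v, rfl⟩ := hx
  have e1 : 2 * L * v = L * (2 * v) := by ring
  rw [e1] at h1 h2
  have hA : 2 * u + 1 ≤ 2 * v := Nat.le_of_mul_le_mul_left h1 hL
  have e2 : L * (2 * u + 1) + L = L * (2 * u + 2) := by ring
  rw [e2] at h2
  have hB : 2 * v < 2 * u + 2 := Nat.lt_of_mul_lt_mul_left h2
  omega

-- ---- the Fenwick chain lemma: for j ≠ p, j is on the update chain of p
-- iff it is on the update chain of p + lowbit p ----
lemma chainN (p i : Nat) (hp : 0 < p) (hi : 0 < i) (hne : i ≠ p) :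
    (p ≤ i ∧ i - lbN i < p) ↔ (p + lbN p ≤ i ∧ i - lbN i < p + lbN p) := by
  obtain ⟨s, u, hLp, hpe⟩ := lbN_spec p hp
  obtain ⟨σ, w, hLi, hie⟩ := lbN_spec i hi
  have hLi_max : ∀ t : Nat, 2 ^ t ∣ i → t ≤ σ := by
    intro t ht
    have h1 : 2 ^ t ∣ lbN i := pow2_dvd_lbN t hi ht
    rw [hLi] at h1
    have h2 : 2 ^ t ≤ 2 ^ σ := Nat.le_of_dvd (by positivity) h1
    exact (Nat.pow_le_pow_iff_right (by omega)).mp h2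
  rw [hLp, hLi]
  have hPpos : 0 < 2 ^ s := by positivity
  have hQpos : 0 < 2 ^ σ := by positivity
  have hQdvd_i : 2 ^ σ ∣ i := ⟨2 * w + 1, hie⟩
  have hPdvd_p : 2 ^ s ∣ p := ⟨2 * u + 1, hpe⟩
  constructor
  · rintro ⟨hple, hlt⟩
    have hpi : p < i := lt_of_le_of_ne hple (Ne.symm hne)
    have hss : s < σ := by
      by_contra hcon
      have hQp : 2 ^ σ ∣ p := (pow_dvd_pow 2 (by omega)).trans hPdvd_p
      have := mult_sep hQpos hQp hQdvd_i hpi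
      omega
    have h2i : 2 * 2 ^ s ∣ i := by
      have h' : (2 : Nat) ^ (s + 1) ∣ 2 ^ σ := pow_dvd_pow 2 (by omega)
      have h2 := h'.trans hQdvd_i
      have e : (2 : Nat) ^ (s + 1) = 2 * 2 ^ s := by ring
      rwa [e] at h2
    constructor
    · by_contra hc
      exact no_even_mult hPpos hpe h2i hple (by omega)
    · omega
  · rintro ⟨hple', hlt'⟩
    refine ⟨by omega, ?_⟩
    have h2dvdp' : 2 * 2 ^ s ∣ p + 2 ^ s := ⟨u + 1, by rw [hpe]; ring⟩
    have hiLi : i - 2 ^ σ = 2 ^ σ * (2 * w) := by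
      have e : 2 ^ σ * (2 * w + 1) = 2 ^ σ * (2 * w) + 2 ^ σ := by ring
      omega
    rcases eq_or_lt_of_le hple' with hcase | hlt2
    · have h2i : 2 * 2 ^ s ∣ i := hcase ▸ h2dvdp'
      have hs1 : s + 1 ≤ σ := by
        apply hLi_max
        have e : (2 : Nat) ^ (s + 1) = 2 * 2 ^ s := by ring
        rwa [e]
      have hle2 : 2 * 2 ^ s ≤ 2 ^ σ := by
        have h' : (2 : Nat) ^ (s + 1) ≤ 2 ^ σ := Nat.pow_le_pow_right (by omega) hs1
        have e : (2 : Nat) ^ (s + 1) = 2 * 2 ^ s := by ring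
        omega
      omega
    · have hnd' : ¬ 2 ^ σ ∣ (p + 2 ^ s) := by
        intro hd
        have := mult_sep hQpos hd hQdvd_i hlt2
        omega
      have hss : s + 1 ≤ σ := by
        by_contra hcon
        have h1 : (2 : Nat) ^ σ ∣ 2 ^ s := pow_dvd_pow 2 (by omega)
        exact hnd' (Nat.dvd_add (h1.trans hPdvd_p) h1)
      have h2σ : 2 * 2 ^ s ∣ 2 ^ σ := by
        have h' : (2 : Nat) ^ (s + 1) ∣ 2 ^ σ := pow_dvd_pow 2 hss
        have e : (2 : Nat) ^ (s + 1) = 2 * 2 ^ s := by ring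
        rwa [e] at h'
      have hsub : 2 * 2 ^ s ∣ i - 2 ^ σ := by
        rw [hiLi]
        exact h2σ.mul_right _
      by_contra hc
      exact no_even_mult hPpos hpe hsub (by omega) (by omega)

lemma chainI (p i : Int) (hp : 1 ≤ p) (hi : 1 ≤ i) (hne : i ≠ p) :
    (p ≤ i ∧ i - pyLowbit i < p) ↔ (p + pyLowbit p ≤ i ∧ i - pyLowbit i < p + pyLowbit p) := by
  rw [pyLowbit_int p hp, pyLowbit_int i hi]
  have h := chainN p.toNat i.toNat (by omega) (by omega) (by omega)
  have h1 : lbN i.toNat ≤ i.toNat := lbN_le (by omega)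
  have h2 : lbN p.toNat ≤ p.toNat := lbN_le (by omega)
  omega

-- ---- pointwise effect of fenAdd ----
lemma fenAddGo_length (n δ : Int) : ∀ (fuel : Nat) (t : List Int) (p : Int),
    (fenAddGo n δ fuel t p).length = t.length := by
  intro fuel
  induction fuel with
  | zero => intro t p; rfl
  | succ f ih =>
    intro t p
    rw [fenAddGo]
    split
    · rw [ih, PySem.List.length_pySetD]
    · rfl

lemma fenAdd_length (n : Int) (t : List Int) (p δ : Int) :
    (fenAdd n t p δ).length = t.length := fenAddGo_length n δ _ t p

lemma pyGetD_toNat (t : List Int) (p : Int) (h0 : 0 ≤ p) (h1 : p < (t.length : Int)) :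
    PySem.List.pyGetD t p 0 = t.getD p.toNat 0 := by
  rw [PySem.List.pyGetD_eq_getElem t 0 h0 h1, List.getD_eq_getElem t 0 (by omega)]

lemma getD_set_zero (l : List Int) (m : Nat) (v : Int) (j : Nat) :
    (l.set m v).getD j 0 = if j = m ∧ m < l.length then v else l.getD j 0 := by
  by_cases h1 : m = j
  · subst h1
    by_cases h2 : m < l.length <;> simp [List.getD_eq_getElem?_getD, List.getElem?_set, h2]
  · have h1' : ¬ (j = m) := fun h => h1 h.symm
    simp [List.getD_eq_getElem?_getD, List.getElem?_set, h1, h1']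

lemma fenAddGo_getD (n δ : Int) : ∀ (fuel : Nat) (t : List Int) (p : Int),
    1 ≤ p → (n + 1 - p).toNat ≤ fuel → t.length = (n + 1).toNat →
    ∀ (j : Nat), 1 ≤ j →
    (fenAddGo n δ fuel t p).getD j 0
      = t.getD j 0 + (if p ≤ (j : Int) ∧ (j : Int) ≤ n ∧ (j : Int) - pyLowbit (j : Int) < p then δ else 0) := by
  intro fuel
  induction fuel with
  | zero =>
    intro t p hp hfuel ht j hj
    have hcond : ¬ (p ≤ (j : Int) ∧ (j : Int) ≤ n ∧ (j : Int) - pyLowbit (j : Int) < p) := by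
      rintro ⟨h1, h2, _⟩; omega
    simp only [fenAddGo, if_neg hcond]
    ring
  | succ f ih =>
    intro t p hp hfuel ht j hj
    simp only [fenAddGo]
    by_cases hpn : p ≤ n
    · rw [if_pos hpn]
      have hlb : 1 ≤ pyLowbit p := pyLowbit_pos p hp
      have ht' : (PySem.List.pySetD t p (PySem.List.pyGetD t p 0 + δ)).length = (n + 1).toNat := by
        rw [PySem.List.length_pySetD]; exact ht
      rw [ih _ _ (by omega) (by omega) ht' j hj]
      rw [PySem.List.pySetD_of_nonneg t _ (by omega), getD_set_zero]
      by_cases hjp : (j : Int) = p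
      · have hcond1 : ¬ (p + pyLowbit p ≤ (j : Int) ∧ (j : Int) ≤ n ∧
            (j : Int) - pyLowbit (j : Int) < p + pyLowbit p) := by
          rintro ⟨h1, _, _⟩; omega
        have heq : j = p.toNat ∧ p.toNat < t.length := ⟨by omega, by omega⟩
        rw [if_neg hcond1, if_pos heq, pyGetD_toNat t p (by omega) (by omega)]
        have hcond2 : p ≤ (j : Int) ∧ (j : Int) ≤ n ∧ (j : Int) - pyLowbit (j : Int) < p :=
          ⟨by omega, by omega, by rw [hjp]; omega⟩
        rw [if_pos hcond2, heq.1]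
        ring
      · have hne : ¬ (j = p.toNat ∧ p.toNat < t.length) := by
          rintro ⟨h1, _⟩; omega
        rw [if_neg hne]
        have hch := chainI p (j : Int) hp (by exact_mod_cast hj) (fun h => hjp h)
        have hiff : (p + pyLowbit p ≤ (j : Int) ∧ (j : Int) ≤ n ∧
              (j : Int) - pyLowbit (j : Int) < p + pyLowbit p)
            ↔ (p ≤ (j : Int) ∧ (j : Int) ≤ n ∧ (j : Int) - pyLowbit (j : Int) < p) := by
          constructor
          · rintro ⟨h1, h2, h3⟩
            have h4 := hch.mpr ⟨h1, h3⟩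
            exact ⟨h4.1, h2, h4.2⟩
          · rintro ⟨h1, h2, h3⟩
            have h4 := hch.mp ⟨h1, h3⟩
            exact ⟨h4.1, h2, h4.2⟩
        rw [if_congr hiff rfl rfl]
    · rw [if_neg hpn]
      have hcond : ¬ (p ≤ (j : Int) ∧ (j : Int) ≤ n ∧ (j : Int) - pyLowbit (j : Int) < p) := by
        rintro ⟨h1, h2, _⟩; omega
      rw [if_neg hcond]; ring

lemma fenAdd_getD (n : Int) (t : List Int) (p δ : Int) (hp : 1 ≤ p)
    (ht : t.length = (n + 1).toNat) (j : Nat) (hj : 1 ≤ j) :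
    (fenAdd n t p δ).getD j 0
      = t.getD j 0 + (if p ≤ (j : Int) ∧ (j : Int) ≤ n ∧ (j : Int) - pyLowbit (j : Int) < p then δ else 0) :=
  fenAddGo_getD n δ _ t p hp le_rfl ht j hj

-- ---- query/add commutation ----
lemma fenQueryGo_fenAdd (n δ : Int) (t : List Int) (ht : t.length = (n + 1).toNat)
    (p : Int) (hp : 1 ≤ p) :
    ∀ (fuel : Nat) (m : Int), m < n + 1 → m.toNat < fuel →
    fenQueryGo (fenAdd n t p δ) fuel m = fenQueryGo t fuel m + (if p ≤ m then δ else 0) := by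
  intro fuel
  induction fuel with
  | zero => intro m hmn hfuel; exact absurd hfuel (by omega)
  | succ f ih =>
    intro m hmn hfuel
    simp only [fenQueryGo]
    by_cases hm : 0 < m
    · rw [if_pos hm, if_pos hm]
      have hlb : 1 ≤ pyLowbit m := pyLowbit_pos m (by omega)
      rw [ih (m - pyLowbit m) (by omega) (by omega)]
      have hlenA : (fenAdd n t p δ).length = t.length := fenAdd_length n t p δ
      have hmlt : m < (t.length : Int) := by omega
      rw [pyGetD_toNat (fenAdd n t p δ) m (by omega) (by rw [hlenA]; exact hmlt),
        pyGetD_toNat t m (by omega) hmlt,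
        fenAdd_getD n t p δ hp ht m.toNat (by omega)]
      have ecast : ((m.toNat : Nat) : Int) = m := Int.toNat_of_nonneg (by omega)
      rw [ecast]
      split_ifs <;> omega
    · rw [if_neg hm, if_neg hm, if_neg (show ¬ p ≤ m by omega)]
      ring

lemma fenQuery_fenAdd (n δ : Int) (t : List Int) (ht : t.length = (n + 1).toNat)
    (p : Int) (hp : 1 ≤ p) (m : Int) (hm : m < n + 1) :
    fenQuery (fenAdd n t p δ) m = fenQuery t m + (if p ≤ m then δ else 0) :=
  fenQueryGo_fenAdd n δ t ht p hp _ m hm (by omega)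

-- ---- counting elements ≤ m ----
def cntLE (l : List Int) (m : Int) : Int := (l.countP (fun x => decide (x ≤ m)) : Int)

lemma cntLE_append (l1 l2 : List Int) (m : Int) :
    cntLE (l1 ++ l2) m = cntLE l1 m + cntLE l2 m := by
  simp [cntLE, List.countP_append]

lemma cntLE_append_singleton0 (l1 : List Int) (x : Int) (l2 : List Int) (m : Int) :
    cntLE (l1 ++ x :: l2) m = cntLE l1 m + ((if x ≤ m then 1 else 0) + cntLE l2 m) := by
  by_cases h : x ≤ m <;>
    simp [cntLE, List.countP_append, List.countP_cons, h] <;> push_cast <;> ring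

lemma cntLE_append_singleton (l : List Int) (p m : Int) :
    cntLE (l ++ [p]) m = cntLE l m + (if p ≤ m then 1 else 0) := by
  by_cases h : p ≤ m <;> simp [cntLE, List.countP_append, List.countP_cons, h]

lemma getD_replicate_zero (k j : Nat) : (List.replicate k (0 : Int)).getD j 0 = 0 := by
  rw [List.getD_eq_getElem?_getD, List.getElem?_replicate]
  split <;> simp

lemma fenQueryGo_replicate (k : Nat) : ∀ (fuel : Nat) (m : Int), m < (k : Int) →
    fenQueryGo (List.replicate k (0 : Int)) fuel m = 0 := by
  intro fuel
  induction fuel with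
  | zero => intro m _; rfl
  | succ f ih =>
    intro m hmk
    simp only [fenQueryGo]
    by_cases hm : 0 < m
    · have hlb : 1 ≤ pyLowbit m := pyLowbit_pos m (by omega)
      rw [if_pos hm, ih (m - pyLowbit m) (by omega),
        pyGetD_toNat _ m (by omega) (by simpa using hmk), getD_replicate_zero]
      ring
    · rw [if_neg hm]

-- query of the initial tree counts the inserted positions
lemma init_fold (n : Int) : ∀ (ps : List Int) (t l : List Int),
    (∀ p ∈ ps, 1 ≤ p ∧ p ≤ n) → t.length = (n + 1).toNat →
    (∀ m, 0 ≤ m → m < n + 1 → fenQuery t m = cntLE l m) →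
    ((ps.foldl (fun t i => fenAdd n t i 1) t).length = (n + 1).toNat ∧
      ∀ m, 0 ≤ m → m < n + 1 →
        fenQuery (ps.foldl (fun t i => fenAdd n t i 1) t) m = cntLE (l ++ ps) m) := by
  intro ps
  induction ps with
  | nil =>
    intro t l _ h2 h3
    refine ⟨h2, ?_⟩
    simpa using h3
  | cons p ps ih =>
    intro t l hmem ht hq
    have hp := hmem p List.mem_cons_self
    have ht' : (fenAdd n t p 1).length = (n + 1).toNat := by
      rw [fenAdd_length]; exact ht
    have hq' : ∀ m, 0 ≤ m → m < n + 1 → fenQuery (fenAdd n t p 1) m = cntLE (l ++ [p]) m := by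
      intro m h0 h1
      rw [fenQuery_fenAdd n 1 t ht p hp.1 m h1, hq m h0 h1, cntLE_append_singleton]
    have h := ih (fenAdd n t p 1) (l ++ [p])
      (fun q hq2 => hmem q (List.mem_cons_of_mem _ hq2)) ht' hq'
    simpa [List.append_assoc] using h

-- ---- the binary search finds the threshold point ----
lemma bsearchGo_finds (t : List Int) (k n T : Int) (hT1 : 1 ≤ T) (hTn : T ≤ n)
    (hiff : ∀ m, 1 ≤ m → m ≤ n → (k ≤ fenQuery t m ↔ T ≤ m)) :
    ∀ (fuel : Nat) (left right chosen : Int),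
    (right + 1 - left).toNat ≤ fuel → 1 ≤ left → right ≤ n → left ≤ T →
    (T ≤ right ∨ chosen = T) →
    bsearchGo t k fuel left right chosen = T := by
  intro fuel
  induction fuel with
  | zero =>
    intro left right chosen hf h1 h2 h3 h4
    rcases h4 with h | h
    · exact absurd hf (by omega)
    · simpa [bsearchGo] using h
  | succ f ih =>
    intro left right chosen hf h1 h2 h3 h4
    simp only [bsearchGo]
    by_cases hlr : left ≤ right
    · rw [if_pos hlr]
      obtain ⟨hm1, hm2⟩ := PySem.Int.floordiv_two_mid_bounds hlr
      by_cases hk : k ≤ fenQuery t (PySem.Int.floordiv (left + right) 2)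
      · rw [if_pos hk]
        have hTmid : T ≤ PySem.Int.floordiv (left + right) 2 :=
          (hiff _ (by omega) (by omega)).mp hk
        exact ih left _ _ (by omega) h1 (by omega) h3 (by omega)
      · rw [if_neg hk]
        have hTmid : ¬ T ≤ PySem.Int.floordiv (left + right) 2 :=
          fun h => hk ((hiff _ (by omega) (by omega)).mpr h)
        exact ih _ right chosen (by omega) (by omega) h2 (by omega) h4
    · rw [if_neg hlr]
      rcases h4 with h | h
      · exact absurd h (by omega)
      · exact h

-- ---- for a strictly increasing list, cnt ≥ c+1 iff the c-th element is ≤ m ----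
lemma cntLE_ge_iff (l : List Int) (hl : l.Pairwise (· < ·)) (c : Nat) (hc : c < l.length) (m : Int) :
    ((c : Int) + 1 ≤ cntLE l m ↔ l[c] ≤ m) := by
  have hpg := List.pairwise_iff_getElem.mp hl
  have hdecomp : l = l.take c ++ l[c] :: l.drop (c + 1) := by
    conv_lhs => rw [← List.take_append_drop c l, List.drop_eq_getElem_cons hc]
  have hcnt := congrArg (fun x => cntLE x m) hdecomp
  simp only at hcnt
  have htlen : (l.take c).length = c := by simp; omega
  have hdropn : 0 ≤ cntLE (l.drop (c + 1)) m := by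
    unfold cntLE; positivity
  constructor
  · intro h
    by_contra hnle
    have h1 : cntLE (l.drop (c + 1)) m = 0 := by
      have hz : List.countP (fun x => decide (x ≤ m)) (l.drop (c + 1)) = 0 := by
        rw [List.countP_eq_zero]
        intro x hx
        obtain ⟨j, hj, hxe⟩ := List.mem_iff_getElem.mp hx
        rw [List.getElem_drop] at hxe
        have hlt : l[c] < l[c + 1 + j]'(by simp at hj; omega) :=
          hpg c (c + 1 + j) hc (by simp at hj; omega) (by omega)
        rw [hxe] at hlt
        simp only [decide_eq_true_eq]
        omega
      simp [cntLE, hz]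
    have h2 : cntLE (l.take c) m ≤ (c : Int) := by
      have hcl := List.countP_le_length (p := fun x => decide (x ≤ m)) (l := l.take c)
      rw [htlen] at hcl
      unfold cntLE
      exact_mod_cast hcl
    rw [hcnt, cntLE_append_singleton0] at h
    omega
  · intro h
    have h1 : cntLE (l.take c) m = (c : Int) := by
      have hcl : List.countP (fun x => decide (x ≤ m)) (l.take c) = (l.take c).length := by
        rw [List.countP_eq_length]
        intro x hx
        obtain ⟨j, hj, hxe⟩ := List.mem_iff_getElem.mp hx
        rw [List.getElem_take] at hxe
        have hlt : l[j]'(by simp at hj; omega) < l[c] :=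
          hpg j c (by simp at hj; omega) hc (by simp at hj; omega)
        rw [hxe] at hlt
        simp only [decide_eq_true_eq]
        omega
      unfold cntLE
      rw [hcl, htlen]
    rw [hcnt, cntLE_append_singleton0]
    rw [if_pos h]
    omega

lemma cntLE_eraseIdx (l : List Int) (c : Nat) (hc : c < l.length) (m : Int) :
    cntLE (l.eraseIdx c) m = cntLE l m - (if l[c] ≤ m then 1 else 0) := by
  have hdecomp : l = l.take c ++ l[c] :: l.drop (c + 1) := by
    conv_lhs => rw [← List.take_append_drop c l, List.drop_eq_getElem_cons hc]
  have hcnt := congrArg (fun x => cntLE x m) hdecomp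
  simp only at hcnt
  rw [List.eraseIdx_eq_take_drop_succ, hcnt, cntLE_append_singleton0, cntLE_append]
  ring

lemma replicate_set_last (k : Nat) (v : Int) :
    (List.replicate (k + 1) (0 : Int)).set k v = List.replicate k 0 ++ [v] := by
  rw [List.replicate_succ', List.set_append, if_neg (by simp)]
  simp

-- ---- the main loop, processing indices k-1, …, 0 ----
lemma engine (n : Int) (sc : List Int)
    (hsc : ∀ i : Nat, i < n.toNat → 0 ≤ sc.getD i 0 ∧ sc.getD i 0 ≤ (i : Int)) :
    ∀ (k : Nat) (t ansA availB accB : List Int), (k : Int) ≤ n →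
    t.length = (n + 1).toNat →
    (∀ m, 0 ≤ m → m < n + 1 → fenQuery t m = cntLE availB m) →
    availB.Pairwise (· < ·) →
    (∀ x ∈ availB, 1 ≤ x ∧ x ≤ n) →
    availB.length = k →
    ansA = List.replicate k 0 ++ accB.reverse →
    ((PySem.List.pyRange ((k : Int) - 1) (-1) (-1)).foldl (aStep n sc) (t, ansA)).2
      = (((PySem.List.pyRange ((k : Int) - 1) (-1) (-1)).foldl (bStep sc) (availB, accB)).2).reverse := by
  intro k
  induction k with
  | zero =>
    intro t ansA availB accB _ _ _ _ _ _ hans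
    rw [show ((0 : Nat) : Int) - 1 = -1 by norm_num, PySem.List.pyRange_neg_one_eq_nil le_rfl]
    simpa using hans
  | succ k ih =>
    intro t ansA availB accB hkn ht hq hpair hmem hlen hans
    have hk_lt : k < n.toNat := by omega
    have e1 : ((k + 1 : Nat) : Int) - 1 = ((k : Nat) : Int) := by push_cast; ring
    rw [e1, PySem.List.pyRange_neg_one_cons (show (-1 : Int) < ((k : Nat) : Int) by omega),
      List.foldl_cons, List.foldl_cons]
    set c := sc.getD k 0 with hc
    have hcb := hsc k hk_lt
    rw [← hc] at hcb
    have hget : PySem.List.pyGetD sc ((k : Nat) : Int) 0 = c := by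
      rw [PySem.List.pyGetD_natCast]
    have hcnat : ((c.toNat : Nat) : Int) = c := Int.toNat_of_nonneg hcb.1
    have hclt : c.toNat < availB.length := by omega
    have hT := hmem (availB[c.toNat]'hclt) (List.getElem_mem hclt)
    have hiff : ∀ m, 1 ≤ m → m ≤ n → (c + 1 ≤ fenQuery t m ↔ availB[c.toNat]'hclt ≤ m) := by
      intro m h1 h2
      rw [hq m (by omega) (by omega)]
      have h3 := cntLE_ge_iff availB hpair c.toNat hclt m
      rwa [hcnat] at h3
    have hbs : bsearchGo t (c + 1) n.toNat 1 n 1 = availB[c.toNat]'hclt :=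
      bsearchGo_finds t (c + 1) n (availB[c.toNat]'hclt) hT.1 hT.2 hiff n.toNat 1 n 1
        (by omega) le_rfl le_rfl hT.1 (Or.inl hT.2)
    have hpop := PySem.List.pop?_natCast availB c.toNat hclt
    rw [hcnat] at hpop
    have hstepA : aStep n sc (t, ansA) ((k : Nat) : Int)
        = (fenAdd n t (availB[c.toNat]'hclt) (-1),
           PySem.List.pySetD ansA ((k : Nat) : Int) (availB[c.toNat]'hclt)) := by
      simp only [aStep, hget, hbs]
    have hstepB : bStep sc (availB, accB) ((k : Nat) : Int)
        = (availB.eraseIdx c.toNat, accB ++ [availB[c.toNat]'hclt]) := by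
      simp only [bStep, hget, hpop]
    rw [hstepA, hstepB]
    apply ih
    · omega
    · rw [fenAdd_length]; exact ht
    · intro m h0 h1
      rw [fenQuery_fenAdd n (-1) t ht _ hT.1 m h1, hq m h0 h1,
        cntLE_eraseIdx availB c.toNat hclt m]
      split_ifs <;> ring
    · exact List.Pairwise.sublist (List.eraseIdx_sublist availB c.toNat) hpair
    · intro x hx
      exact hmem x ((List.eraseIdx_sublist availB c.toNat).subset hx)
    · rw [List.length_eraseIdx]
      simp only [if_pos hclt]
      omega
    · rw [PySem.List.pySetD_of_nonneg _ _ (by exact_mod_cast Nat.zero_le k), Int.toNat_natCast,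
        hans, List.set_append, if_pos (by simp), replicate_set_last]
      simp [List.reverse_append, List.append_assoc]

-- ===== VERDICT (by name: the statement is the Claim_ definition above) =====
theorem solve_lost_cows_spec : Claim_equal_solve_lost_cows := by
  intro n sc hdom hpre
  obtain ⟨hlenpre, hsc⟩ := hpre
  unfold Spec_solve_lost_cows
  simp only [solve_lost_cows, solve_lost_cows_alt]
  by_cases hn : 0 < n
  · have hkn : ((n.toNat : Nat) : Int) = n := Int.toNat_of_nonneg (by omega)
    obtain ⟨hlen0, hq0⟩ := init_fold n (PySem.List.pyRange 1 (n + 1) 1)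
      (List.replicate (n + 1).toNat 0) []
      (by
        intro p hp
        rw [PySem.List.mem_pyRange_one] at hp
        exact ⟨hp.1, by omega⟩)
      (by simp)
      (by
        intro m h0 h1
        unfold fenQuery
        rw [fenQueryGo_replicate (n + 1).toNat _ m (by omega)]
        simp [cntLE])
    have hpair : (PySem.List.pyRange 1 (n + 1) 1).Pairwise (· < ·) :=
      PySem.List.pairwise_lt_pyRange_one 1 (n + 1)
    have hmem : ∀ x ∈ PySem.List.pyRange 1 (n + 1) 1, 1 ≤ x ∧ x ≤ n := by
      intro x hx
      rw [PySem.List.mem_pyRange_one] at hx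
      exact ⟨hx.1, by omega⟩
    have hlenavail : (PySem.List.pyRange 1 (n + 1) 1).length = n.toNat := by
      rw [PySem.List.length_pyRange_one]
      omega
    have heng := engine n sc hsc n.toNat
      ((PySem.List.pyRange 1 (n + 1) 1).foldl (fun t i => fenAdd n t i 1)
        (List.replicate (n + 1).toNat 0))
      (List.replicate n.toNat 0)
      (PySem.List.pyRange 1 (n + 1) 1)
      [] (by omega)
      hlen0
      (by
        intro m h0 h1
        rw [hq0 m h0 h1]
        simp)
      hpair hmem hlenavail (by simp)
    rw [hkn] at heng
    exact heng
  · have h1 : PySem.List.pyRange (n - 1) (-1) (-1) = [] :=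
      PySem.List.pyRange_neg_one_eq_nil (by omega)
    have h2 : n.toNat = 0 := by omega
    simp [h1, h2]
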